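-- pv_equiv track=rewrite | github.com/luizaugustoliveira/Algoritmos | Arrays e Ordenação/obsfucation/obsfucation.py | obfusca
-- ===== SOURCE A (Python) =====
-- def obfusca(codigo):
--     asteriscos = 0
--     novo_codigo = ""
--     for i in range(len(codigo)):
--         if type(codigo[i]) == str:
--             if codigo[i].islower():
--                 novo_codigo += codigo[i].upper()
--                 asteriscos += 1
--             elif codigo[i].isupper():
--                 novo_codigo += codigo[i].lower()
--                 asteriscos += 1
--             elif codigo[i] == " ":
--                 novo_codigo += "*" * asteriscos
--                 asteriscos = 0
--             else:
--                 novo_codigo += codigo[i]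
--                 asteriscos += 1
--         else:
--             novo_codigo += codigo[i]
--             asteriscos += 1
--
--     codigo_final = ""
--     for i in range(len(novo_codigo)):
--         if novo_codigo[i] == "A" or novo_codigo[i] == "a":
--             codigo_final += "4"
--         elif novo_codigo[i] == "B" or novo_codigo[i] == "b":
--             codigo_final += "8"
--         elif novo_codigo[i] == "E" or novo_codigo[i] == "e":
--             codigo_final += "3"
--         elif novo_codigo[i] == "G" or novo_codigo[i] == "g":
--             codigo_final += "6"
--         elif novo_codigo[i] == "I" or novo_codigo[i] == "i":
--             codigo_final += "1"
--         elif novo_codigo[i] == "L" or novo_codigo[i] == "l":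
--             codigo_final += "7"
--         elif novo_codigo[i] == "S" or novo_codigo[i] == "s":
--             codigo_final += "5"
--         elif novo_codigo[i] == "O" or novo_codigo[i] == "o":
--             codigo_final += "0"
--         elif novo_codigo[i] == "4":
--             codigo_final += "A"
--         elif novo_codigo[i] == "8":
--             codigo_final += "B"
--         elif novo_codigo[i] == "3":
--             codigo_final += "E"
--         elif novo_codigo[i] == "6":
--             codigo_final += "G"
--         elif novo_codigo[i] == "1":
--             codigo_final += "I"
--         elif novo_codigo[i] == "7":
--             codigo_final += "L"
--         elif novo_codigo[i] == "5":
--             codigo_final += "S"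
--         elif novo_codigo[i] == "0":
--             codigo_final += "O"
--         else:
--             codigo_final += novo_codigo[i]
--
--     return codigo_final
-- ===== SOURCE B (Python) =====
-- _LEET = {'A': '4', 'a': '4', 'B': '8', 'b': '8', 'E': '3', 'e': '3',
--          'G': '6', 'g': '6', 'I': '1', 'i': '1', 'L': '7', 'l': '7',
--          'S': '5', 's': '5', 'O': '0', 'o': '0',
--          '4': 'A', '8': 'B', '3': 'E', '6': 'G',
--          '1': 'I', '7': 'L', '5': 'S', '0': 'O'}
--
--
-- def obfusca(codigo):
--     parts = []
--     asteriscos = 0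
--     for c in codigo:
--         if c == " ":
--             parts.append("*" * asteriscos)
--             asteriscos = 0
--         else:
--             s = c.upper() if c.islower() else (c.lower() if c.isupper() else c)
--             parts.append("".join(_LEET.get(ch, ch) for ch in s))
--             asteriscos += 1
--     return "".join(parts)
-- ===== Notes on version B (the rewrite author's own statement) =====
-- stated objective: simpler
-- what changed: B fuses A's two passes (case-swap/asterisk pass, then a 24-branch leet if-chain pass) into one loop over the input that applies a leet translation dict to the case-swapped character directly, never materialising the intermediate string.
import Mathlib
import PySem

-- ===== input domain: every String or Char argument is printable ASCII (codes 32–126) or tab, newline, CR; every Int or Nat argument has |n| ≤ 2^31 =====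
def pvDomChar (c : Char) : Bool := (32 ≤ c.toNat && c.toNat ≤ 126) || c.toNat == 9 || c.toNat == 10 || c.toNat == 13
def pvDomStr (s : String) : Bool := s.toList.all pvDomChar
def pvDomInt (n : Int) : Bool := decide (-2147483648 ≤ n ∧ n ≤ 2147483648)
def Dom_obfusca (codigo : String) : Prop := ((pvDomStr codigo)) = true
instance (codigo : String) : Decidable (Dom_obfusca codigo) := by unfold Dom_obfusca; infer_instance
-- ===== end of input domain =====

-- B fuses A's two passes into one loop applying a leet translation dict to the
-- case-swapped character directly (simpler; same O(n) cost).

-- ===== PORT A =====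
-- first loop: case-swap, '*'-run on spaces, counter of chars since last space
def obfuscaPass1 (cs : List Char) (asteriscos : Nat) (novo : List Char) : List Char :=
  match cs with
  | [] => novo
  | c :: rest =>
    if PySem.Chars.islower c then
      obfuscaPass1 rest (asteriscos + 1) (novo ++ [PySem.Chars.upperChar c])
    else if PySem.Chars.isupper c then
      obfuscaPass1 rest (asteriscos + 1) (novo ++ [PySem.Chars.lowerChar c])
    else if c = ' ' then
      obfuscaPass1 rest 0 (novo ++ List.replicate asteriscos '*')
    else
      obfuscaPass1 rest (asteriscos + 1) (novo ++ [c])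

-- the body of A's second loop: the 17-branch if-chain
def obfuscaLeetA (c : Char) : Char :=
  if c = 'A' ∨ c = 'a' then '4'
  else if c = 'B' ∨ c = 'b' then '8'
  else if c = 'E' ∨ c = 'e' then '3'
  else if c = 'G' ∨ c = 'g' then '6'
  else if c = 'I' ∨ c = 'i' then '1'
  else if c = 'L' ∨ c = 'l' then '7'
  else if c = 'S' ∨ c = 's' then '5'
  else if c = 'O' ∨ c = 'o' then '0'
  else if c = '4' then 'A'
  else if c = '8' then 'B'
  else if c = '3' then 'E'
  else if c = '6' then 'G'
  else if c = '1' then 'I'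
  else if c = '7' then 'L'
  else if c = '5' then 'S'
  else if c = '0' then 'O'
  else c

-- second loop: append the substitution of each char of novo_codigo in order
def obfuscaPass2 (cs : List Char) : List Char :=
  match cs with
  | [] => []
  | c :: rest => obfuscaLeetA c :: obfuscaPass2 rest

def obfusca (codigo : String) : String :=
  String.mk (obfuscaPass2 (obfuscaPass1 codigo.toList 0 []))

-- ===== PORT B =====
-- the _LEET translation dict of Source B
def leetDict : PySem.Dict Char Char :=
  PySem.Dict.mk [('A', '4'), ('a', '4'), ('B', '8'), ('b', '8'), ('E', '3'), ('e', '3'),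
                 ('G', '6'), ('g', '6'), ('I', '1'), ('i', '1'), ('L', '7'), ('l', '7'),
                 ('S', '5'), ('s', '5'), ('O', '0'), ('o', '0'),
                 ('4', 'A'), ('8', 'B'), ('3', 'E'), ('6', 'G'),
                 ('1', 'I'), ('7', 'L'), ('5', 'S'), ('0', 'O')]

-- single fused pass of Source B, building the output front to back
def obfuscaAltGo (cs : List Char) (asteriscos : Nat) : List Char :=
  match cs with
  | [] => []
  | c :: rest =>
    if c = ' ' then
      List.replicate asteriscos '*' ++ obfuscaAltGo rest 0
    else
      let s : List Char :=
        if PySem.Chars.islower c then [PySem.Chars.upperChar c]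
        else if PySem.Chars.isupper c then [PySem.Chars.lowerChar c]
        else [c]
      s.map (fun ch => leetDict.getD ch ch) ++ obfuscaAltGo rest (asteriscos + 1)

def obfusca_alt (codigo : String) : String :=
  String.mk (obfuscaAltGo codigo.toList 0)

-- ===== PRECONDITION & SPEC =====
def Spec_obfusca (codigo : String) (out : String) : Prop := out = obfusca_alt codigo
instance (codigo : String) (out : String) : Decidable (Spec_obfusca codigo out) := by unfold Spec_obfusca; infer_instance

-- ===== CLAIM (what is proved, stated in full; the proofs are below) =====
def Claim_equal_obfusca : Prop := ∀ (codigo : String), Dom_obfusca codigo → Spec_obfusca codigo (obfusca codigo)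

-- ===== LEMMAS AND PROOFS =====

theorem leetDict_getD_eq (c : Char) : leetDict.getD c c = obfuscaLeetA c := by
  by_cases h0 : ('A' : Char) = c
  · subst h0; decide
  by_cases h1 : ('a' : Char) = c
  · subst h1; decide
  by_cases h2 : ('B' : Char) = c
  · subst h2; decide
  by_cases h3 : ('b' : Char) = c
  · subst h3; decide
  by_cases h4 : ('E' : Char) = c
  · subst h4; decide
  by_cases h5 : ('e' : Char) = c
  · subst h5; decide
  by_cases h6 : ('G' : Char) = c
  · subst h6; decide
  by_cases h7 : ('g' : Char) = c
  · subst h7; decide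
  by_cases h8 : ('I' : Char) = c
  · subst h8; decide
  by_cases h9 : ('i' : Char) = c
  · subst h9; decide
  by_cases h10 : ('L' : Char) = c
  · subst h10; decide
  by_cases h11 : ('l' : Char) = c
  · subst h11; decide
  by_cases h12 : ('S' : Char) = c
  · subst h12; decide
  by_cases h13 : ('s' : Char) = c
  · subst h13; decide
  by_cases h14 : ('O' : Char) = c
  · subst h14; decide
  by_cases h15 : ('o' : Char) = c
  · subst h15; decide
  by_cases h16 : ('4' : Char) = c
  · subst h16; decide
  by_cases h17 : ('8' : Char) = c
  · subst h17; decide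
  by_cases h18 : ('3' : Char) = c
  · subst h18; decide
  by_cases h19 : ('6' : Char) = c
  · subst h19; decide
  by_cases h20 : ('1' : Char) = c
  · subst h20; decide
  by_cases h21 : ('7' : Char) = c
  · subst h21; decide
  by_cases h22 : ('5' : Char) = c
  · subst h22; decide
  by_cases h23 : ('0' : Char) = c
  · subst h23; decide
  simp [leetDict, PySem.Dict.getD_eq_get?_getD, PySem.Dict.get?_mk_cons, PySem.Dict.get?, obfuscaLeetA, h0, h1, h2, h3, h4, h5, h6, h7, h8, h9, h10, h11, h12, h13, h14, h15, h16, h17, h18, h19, h20, h21, h22, h23, Ne.symm h0, Ne.symm h1, Ne.symm h2, Ne.symm h3, Ne.symm h4, Ne.symm h5, Ne.symm h6, Ne.symm h7, Ne.symm h8, Ne.symm h9, Ne.symm h10, Ne.symm h11, Ne.symm h12, Ne.symm h13, Ne.symm h14, Ne.symm h15, Ne.symm h16, Ne.symm h17, Ne.symm h18, Ne.symm h19, Ne.symm h20, Ne.symm h21, Ne.symm h22, Ne.symm h23]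

theorem obfuscaPass2_append (xs ys : List Char) :
    obfuscaPass2 (xs ++ ys) = obfuscaPass2 xs ++ obfuscaPass2 ys := by
  induction xs with
  | nil => rfl
  | cons x xs ih => simp [obfuscaPass2, ih]

theorem obfuscaPass2_replicate (n : Nat) :
    obfuscaPass2 (List.replicate n '*') = List.replicate n '*' := by
  induction n with
  | zero => rfl
  | succ n ih => simp [List.replicate_succ, obfuscaPass2, ih, obfuscaLeetA]

theorem pass_fusion (cs : List Char) (ast : Nat) (acc : List Char) :
    obfuscaPass2 (obfuscaPass1 cs ast acc) = obfuscaPass2 acc ++ obfuscaAltGo cs ast := by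
  induction cs generalizing ast acc with
  | nil => simp [obfuscaPass1, obfuscaAltGo]
  | cons c rest ih =>
    by_cases hl : PySem.Chars.islower c
    · have hsp : ¬ c = ' ' := by
        intro h; subst h; simp [PySem.Chars.islower] at hl
      simp [obfuscaPass1, obfuscaAltGo, hl, hsp, ih, obfuscaPass2_append,
            obfuscaPass2, leetDict_getD_eq]
    · by_cases hu : PySem.Chars.isupper c
      · have hsp : ¬ c = ' ' := by
          intro h; subst h; simp [PySem.Chars.isupper] at hu
        simp [obfuscaPass1, obfuscaAltGo, hl, hu, hsp, ih, obfuscaPass2_append,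
              obfuscaPass2, leetDict_getD_eq]
      · by_cases hsp : c = ' '
        · have l1 : PySem.Chars.islower ' ' = false := by decide
          have l2 : PySem.Chars.isupper ' ' = false := by decide
          simp [obfuscaPass1, obfuscaAltGo, hsp, l1, l2, ih, obfuscaPass2_append,
                obfuscaPass2_replicate]
        · simp [obfuscaPass1, obfuscaAltGo, hl, hu, hsp, ih, obfuscaPass2_append,
                obfuscaPass2, leetDict_getD_eq]

-- ===== VERDICT (by name: the statement is the Claim_ definition above) =====
theorem obfusca_spec : Claim_equal_obfusca := by
  intro codigo _
  unfold Spec_obfusca obfusca obfusca_alt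
  rw [pass_fusion]
  rfl
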